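-- pv_equiv track=rewrite | github.com/JayTheDuckk/DuckMonitoring | backend_django/inventory/discovery.py | guess_host_type
-- ===== SOURCE A (Python) =====
-- from typing import List, Dict, Optional, Tuple
--
-- def guess_host_type(services: List[Dict]) -> str:
--     ports = {s['port'] for s in services}
--     if 161 in ports: return 'network_device' # SNMP
--     if 80 in ports or 443 in ports: return 'web_server'
--     if 3306 in ports or 5432 in ports: return 'database'
--     if 3389 in ports: return 'windows_server'
--     if 22 in ports: return 'linux_server'
--     return 'unknown'
-- ===== SOURCE B (Python) =====
-- from typing import List, Dict, Optional, Tuple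
--
-- RANK = {161: 0, 80: 1, 443: 1, 3306: 2, 5432: 2, 3389: 3, 22: 4}
-- TYPES = ['network_device', 'web_server', 'database', 'windows_server', 'linux_server']
--
-- def guess_host_type(services: List[Dict]) -> str:
--     best = 5
--     for s in services:
--         r = RANK.get(s['port'], 5)
--         if r < best:
--             best = r
--     return TYPES[best] if best < 5 else 'unknown'
-- ===== Notes on version B (the rewrite author's own statement) =====
-- stated objective: alternative
-- what changed: Replaces the set-building plus ordered membership-check cascade with a single pass keeping the minimum priority rank from a port->rank table, then one indexed lookup of the type name.
import Mathlib
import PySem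

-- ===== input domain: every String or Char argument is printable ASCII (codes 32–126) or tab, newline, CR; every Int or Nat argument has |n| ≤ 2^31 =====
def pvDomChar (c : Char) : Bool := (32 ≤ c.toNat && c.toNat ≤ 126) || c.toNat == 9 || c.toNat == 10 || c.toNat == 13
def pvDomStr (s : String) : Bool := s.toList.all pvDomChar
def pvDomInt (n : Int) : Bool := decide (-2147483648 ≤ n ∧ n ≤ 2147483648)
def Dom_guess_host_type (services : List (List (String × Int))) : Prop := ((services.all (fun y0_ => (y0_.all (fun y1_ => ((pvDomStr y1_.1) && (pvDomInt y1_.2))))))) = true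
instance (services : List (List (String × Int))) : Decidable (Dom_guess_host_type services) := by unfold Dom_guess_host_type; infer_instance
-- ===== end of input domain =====

-- B replaces A's build-a-set-then-ordered-membership-cascade with one running-minimum pass
-- over a port->priority-rank table (objective: alternative decomposition, same cost).

-- ===== PORT A =====
def guess_host_type (services : List (List (String × Int))) : String :=
  let ports : PySem.Set Int :=
    PySem.Set.ofList (services.map (fun s => (PySem.Dict.mk s).getD "port" 0))
  if PySem.Set.contains ports 161 then "network_device"
  else if PySem.Set.contains ports 80 || PySem.Set.contains ports 443 then "web_server"
  else if PySem.Set.contains ports 3306 || PySem.Set.contains ports 5432 then "database"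
  else if PySem.Set.contains ports 3389 then "windows_server"
  else if PySem.Set.contains ports 22 then "linux_server"
  else "unknown"

-- ===== PORT B =====
def pvRANK : PySem.Dict Int Int :=
  PySem.Dict.mk [(161, 0), (80, 1), (443, 1), (3306, 2), (5432, 2), (3389, 3), (22, 4)]

def pvTYPES : List String :=
  ["network_device", "web_server", "database", "windows_server", "linux_server"]

def guess_host_type_alt (services : List (List (String × Int))) : String :=
  let best : Int := services.foldl
    (fun b s =>
      let r := pvRANK.getD ((PySem.Dict.mk s).getD "port" 0) 5
      if r < b then r else b) 5
  if best < 5 then PySem.List.pyGetD pvTYPES best "unknown" else "unknown"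

-- ===== PRECONDITION & SPEC =====
-- Pre_ excludes exactly the services lacking a 'port' key, on which A raises KeyError.
def Pre_guess_host_type (services : List (List (String × Int))) : Prop :=
  services.all (fun s => (PySem.Dict.mk s).contains "port") = true
instance (services : List (List (String × Int))) : Decidable (Pre_guess_host_type services) := by
  unfold Pre_guess_host_type; infer_instance

def pvWitness_guess_host_type : (List (List (String × Int))) := [[("port", 80)], [("port", 22)]]

def Spec_guess_host_type (services : List (List (String × Int))) (out : String) : Prop := out = guess_host_type_alt services
instance (services : List (List (String × Int))) (out : String) : Decidable (Spec_guess_host_type services out) := by unfold Spec_guess_host_type; infer_instance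

-- ===== CLAIM (what is proved, stated in full; the proofs are below) =====
def Claim_equal_guess_host_type : Prop := ∀ (services : List (List (String × Int))), Dom_guess_host_type services → Pre_guess_host_type services → Spec_guess_host_type services (guess_host_type services)

-- ===== LEMMAS AND PROOFS =====

-- the rank table as a closed-form function of the port
lemma pvRANK_getD (p : Int) :
    pvRANK.getD p 5 =
      if p = 161 then 0 else if p = 80 then 1 else if p = 443 then 1
      else if p = 3306 then 2 else if p = 5432 then 2 else if p = 3389 then 3
      else if p = 22 then 4 else 5 := by
  simp only [pvRANK, PySem.Dict.getD_eq_get?_getD, PySem.Dict.get?_mk_cons, beq_iff_eq]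
  have hnil : (PySem.Dict.mk ([] : List (Int × Int))).get? p = none := rfl
  rw [hnil]
  split_ifs <;> first | rfl | (exfalso; omega)

-- characterisation of B's running-minimum loop: an upper bound on the fold
lemma foldl_min_le {α : Type} (f : α → Int) (l : List α) (b k : Int) :
    l.foldl (fun b s => let r := f s; if r < b then r else b) b ≤ k ↔
      b ≤ k ∨ ∃ s ∈ l, f s ≤ k := by
  induction l generalizing b with
  | nil => simp
  | cons x xs ih =>
    simp only [List.foldl_cons, ih, List.mem_cons]
    constructor
    · rintro (h | ⟨s, hs, hk⟩)
      · by_cases hx : f x < b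
        · simp only [if_pos hx] at h
          exact Or.inr ⟨x, Or.inl rfl, h⟩
        · simp only [if_neg hx] at h; exact Or.inl h
      · exact Or.inr ⟨s, Or.inr hs, hk⟩
    · rintro (h | ⟨s, (rfl | hs), hk⟩)
      · split_ifs with hx
        · exact Or.inl (le_of_lt (lt_of_lt_of_le hx h))
        · exact Or.inl h
      · split_ifs with hx
        · exact Or.inl hk
        · exact Or.inl (le_trans (not_lt.mp hx) hk)
      · exact Or.inr ⟨s, hs, hk⟩

-- a lower bound on the fold
lemma foldl_min_ge {α : Type} (f : α → Int) (l : List α) (b k : Int) (hb : k ≤ b)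
    (hl : ∀ s ∈ l, k ≤ f s) :
    k ≤ l.foldl (fun b s => let r := f s; if r < b then r else b) b := by
  induction l generalizing b with
  | nil => simpa
  | cons x xs ih =>
    simp only [List.foldl_cons]
    apply ih
    · split_ifs
      · exact hl x (List.mem_cons_self)
      · exact hb
    · exact fun s hs => hl s (List.mem_cons_of_mem _ hs)

-- ===== VERDICT (by name: the statement is the Claim_ definition above) =====
theorem guess_host_type_spec : Claim_equal_guess_host_type := by
  intro services _ _
  unfold Spec_guess_host_type guess_host_type guess_host_type_alt
  set port : List (String × Int) → Int := fun s => (PySem.Dict.mk s).getD "port" 0 with hport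
  have hrank : ∀ (k : Int), 0 ≤ k → k ≤ 4 →
      ((services.foldl
        (fun b s => let r := pvRANK.getD (port s) 5; if r < b then r else b) 5) ≤ k
        ↔ ∃ s ∈ services, pvRANK.getD (port s) 5 ≤ k) := by
    intro k hk0 hk4
    rw [foldl_min_le]
    exact ⟨fun h => h.resolve_left (by omega), Or.inr⟩
  have hge : 0 ≤ services.foldl
      (fun b s => let r := pvRANK.getD (port s) 5; if r < b then r else b) 5 := by
    apply foldl_min_ge
    · omega
    · intro s _; rw [pvRANK_getD]; split_ifs <;> omega
  have hle : services.foldl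
      (fun b s => let r := pvRANK.getD (port s) 5; if r < b then r else b) 5 ≤ 5 := by
    rw [foldl_min_le]; left; omega
  set m : Int := services.foldl
      (fun b s => let r := pvRANK.getD (port s) 5; if r < b then r else b) 5 with hm
  -- membership of a port value in A's set
  have hmem : ∀ (v : Int),
      (PySem.Set.contains (PySem.Set.ofList (services.map port)) v = true) ↔
        ∃ s ∈ services, port s = v := by
    intro v
    rw [PySem.Set.contains_iff, PySem.Set.mem_ofList, List.mem_map]
  by_cases h161 : ∃ s ∈ services, port s = 161
  · have hub : m ≤ 0 := by
      rw [hrank 0 (by omega) (by omega)]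
      obtain ⟨s, hs, hv⟩ := h161
      exact ⟨s, hs, by rw [pvRANK_getD, hv]; norm_num⟩
    have hm0 : m = 0 := le_antisymm hub hge
    rw [if_pos ((hmem 161).2 h161), hm0]
    decide
  · rw [if_neg (by simp only [hmem 161]; exact fun h => h161 h)]
    have hn0 : ¬ m ≤ 0 := by
      rw [hrank 0 (by omega) (by omega)]
      rintro ⟨s, hs, hle0⟩
      rw [pvRANK_getD] at hle0
      split_ifs at hle0 with hp <;> first | exact h161 ⟨s, hs, hp⟩ | omega
    by_cases h1 : (∃ s ∈ services, port s = 80) ∨ (∃ s ∈ services, port s = 443)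
    · have hub : m ≤ 1 := by
        rw [hrank 1 (by omega) (by omega)]
        rcases h1 with ⟨s, hs, hv⟩ | ⟨s, hs, hv⟩ <;>
          exact ⟨s, hs, by rw [pvRANK_getD, hv]; norm_num⟩
      have hm1 : m = 1 := le_antisymm hub (by simpa using Int.lt_iff_add_one_le.mp (not_le.mp hn0))
      rw [if_pos (by simp only [Bool.or_eq_true, hmem 80, hmem 443]; exact h1), hm1]
      decide
    · push Not at h1
      rw [if_neg (by simp only [Bool.or_eq_true, hmem 80, hmem 443]; tauto)]
      have hn1 : ¬ m ≤ 1 := by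
        rw [hrank 1 (by omega) (by omega)]
        rintro ⟨s, hs, hle1⟩
        rw [pvRANK_getD] at hle1
        split_ifs at hle1 with hp hq hr <;>
          first
          | exact h161 ⟨s, hs, hp⟩
          | exact h1.1 s hs hq
          | exact h1.2 s hs hr
          | omega
      by_cases h2 : (∃ s ∈ services, port s = 3306) ∨ (∃ s ∈ services, port s = 5432)
      · have hub : m ≤ 2 := by
          rw [hrank 2 (by omega) (by omega)]
          rcases h2 with ⟨s, hs, hv⟩ | ⟨s, hs, hv⟩ <;>
            exact ⟨s, hs, by rw [pvRANK_getD, hv]; norm_num⟩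
        have hm2 : m = 2 := le_antisymm hub (by simpa using Int.lt_iff_add_one_le.mp (not_le.mp hn1))
        rw [if_pos (by simp only [Bool.or_eq_true, hmem 3306, hmem 5432]; exact h2), hm2]
        decide
      · push Not at h2
        rw [if_neg (by simp only [Bool.or_eq_true, hmem 3306, hmem 5432]; tauto)]
        have hn2 : ¬ m ≤ 2 := by
          rw [hrank 2 (by omega) (by omega)]
          rintro ⟨s, hs, hle2⟩
          rw [pvRANK_getD] at hle2
          split_ifs at hle2 with hp hq hr ht hu <;>
            first
            | exact h161 ⟨s, hs, hp⟩
            | exact h1.1 s hs hq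
            | exact h1.2 s hs hr
            | exact h2.1 s hs ht
            | exact h2.2 s hs hu
            | omega
        by_cases h3 : ∃ s ∈ services, port s = 3389
        · have hub : m ≤ 3 := by
            rw [hrank 3 (by omega) (by omega)]
            obtain ⟨s, hs, hv⟩ := h3
            exact ⟨s, hs, by rw [pvRANK_getD, hv]; norm_num⟩
          have hm3 : m = 3 := le_antisymm hub (by simpa using Int.lt_iff_add_one_le.mp (not_le.mp hn2))
          rw [if_pos ((hmem 3389).2 h3), hm3]
          decide
        · rw [if_neg (by simp only [hmem 3389]; exact fun h => h3 h)]
          have hn3 : ¬ m ≤ 3 := by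
            rw [hrank 3 (by omega) (by omega)]
            rintro ⟨s, hs, hle3⟩
            rw [pvRANK_getD] at hle3
            split_ifs at hle3 with hp hq hr ht hu hv <;>
              first
              | exact h161 ⟨s, hs, hp⟩
              | exact h1.1 s hs hq
              | exact h1.2 s hs hr
              | exact h2.1 s hs ht
              | exact h2.2 s hs hu
              | exact h3 ⟨s, hs, hv⟩
              | omega
          by_cases h4 : ∃ s ∈ services, port s = 22
          · have hub : m ≤ 4 := by
              rw [hrank 4 (by omega) (by omega)]
              obtain ⟨s, hs, hv⟩ := h4
              exact ⟨s, hs, by rw [pvRANK_getD, hv]; norm_num⟩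
            have hm4 : m = 4 := le_antisymm hub (by simpa using Int.lt_iff_add_one_le.mp (not_le.mp hn3))
            rw [if_pos ((hmem 22).2 h4), hm4]
            decide
          · rw [if_neg (by simp only [hmem 22]; exact fun h => h4 h)]
            have hn4 : ¬ m ≤ 4 := by
              rw [hrank 4 (by omega) (by omega)]
              rintro ⟨s, hs, hle4⟩
              rw [pvRANK_getD] at hle4
              split_ifs at hle4 with hp hq hr ht hu hv hw <;>
                first
                | exact h161 ⟨s, hs, hp⟩
                | exact h1.1 s hs hq
                | exact h1.2 s hs hr
                | exact h2.1 s hs ht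
                | exact h2.2 s hs hu
                | exact h3 ⟨s, hs, hv⟩
                | exact h4 ⟨s, hs, hw⟩
                | omega
            have hm5 : m = 5 := le_antisymm hle (by simpa using Int.lt_iff_add_one_le.mp (not_le.mp hn4))
            rw [hm5]
            decide
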